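-- pv_equiv track=rewrite | github.com/7s9n/learning_python | bit_manipulation/binary_and_operator.py | binary_and
-- ===== SOURCE A (Python) =====
-- def binary_and(a: int , b: int) -> str:
--     """
--     Take in 2 integers, convert them to binary,
--     return a binary number that is the
--     result of a binary and operation on the integers provided.
--     """
--
--     if a < 0 or b < 0:
--         raise ValueError('The value of both number must be positive')
--
--     a_bin = str(bin(a))[2:] # remove the leading "0b"
--     b_bin = str(bin(b))[2:] # remove the leading "0b"
--
--     max_length = max( len(a_bin) , len(b_bin) )
--
--     return '0b' + "".join(
--         str( int( a_bit == '1' and b_bit == '1' ) )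
--         for a_bit , b_bit in zip(a_bin.zfill(max_length) , b_bin.zfill(max_length))
--     )
-- ===== SOURCE B (Python) =====
-- def binary_and(a: int, b: int) -> str:
--     """Closed-form re-implementation: use the native & operator and zfill
--     instead of zipping padded bit strings character by character."""
--     if a < 0 or b < 0:
--         raise ValueError('The value of both number must be positive')
--
--     max_length = max(len(bin(a)) - 2, len(bin(b)) - 2)
--     return '0b' + format(a & b, 'b').zfill(max_length)
-- ===== Notes on version B (the rewrite author's own statement) =====
-- stated objective: simpler
-- what changed: Replaces the character-by-character zip/compare over two zero-padded binary strings by the native bitwise a & b formatted once and zfill-padded to the same width.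
import Mathlib
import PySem

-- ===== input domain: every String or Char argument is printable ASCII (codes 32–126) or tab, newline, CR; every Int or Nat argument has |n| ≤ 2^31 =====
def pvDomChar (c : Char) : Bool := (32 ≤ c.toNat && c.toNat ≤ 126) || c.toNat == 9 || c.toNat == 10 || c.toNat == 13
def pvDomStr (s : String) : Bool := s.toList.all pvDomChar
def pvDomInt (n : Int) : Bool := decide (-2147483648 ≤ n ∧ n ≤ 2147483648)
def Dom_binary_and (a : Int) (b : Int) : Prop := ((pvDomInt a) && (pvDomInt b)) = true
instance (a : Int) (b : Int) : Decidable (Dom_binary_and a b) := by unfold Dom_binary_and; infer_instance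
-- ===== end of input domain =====

-- B computes a & b once and zfill-pads it, instead of A's character-by-character
-- zip/compare over two zero-padded binary strings (objective: simpler).

-- ===== PORT A =====
def binary_and (a : Int) (b : Int) : String :=
  if a < 0 ∨ b < 0 then ""  -- Python raises ValueError here; excluded by Pre_binary_and
  else
    let a_bin : String := PySem.Str.slice (PySem.Int.pyBin a) (some 2) none  -- str(bin(a))[2:]
    let b_bin : String := PySem.Str.slice (PySem.Int.pyBin b) (some 2) none
    let max_length : Int := max (PySem.Str.len a_bin) (PySem.Str.len b_bin)
    "0b" ++ String.ofList
      (((PySem.Str.zfill a_bin max_length).toList.zip (PySem.Str.zfill b_bin max_length).toList).map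
        (fun p => if p.1 = '1' ∧ p.2 = '1' then '1' else '0'))

-- ===== PORT B =====
def binary_and_alt (a : Int) (b : Int) : String :=
  if a < 0 ∨ b < 0 then ""  -- Python raises ValueError here; excluded by Pre_binary_and
  else
    let max_length : Int :=
      max (PySem.Str.len (PySem.Int.pyBin a) - 2) (PySem.Str.len (PySem.Int.pyBin b) - 2)
    "0b" ++ PySem.Str.zfill (PySem.Int.toBin (PySem.Int.band a b)) max_length

-- ===== PRECONDITION & SPEC =====
-- Pre_ excludes exactly the inputs (a negative argument) on which Python A raises ValueError.
def Pre_binary_and (a : Int) (b : Int) : Prop := 0 ≤ a ∧ 0 ≤ b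
instance (a : Int) (b : Int) : Decidable (Pre_binary_and a b) := by unfold Pre_binary_and; infer_instance
def pvWitness_binary_and : Int × Int := (5, 3)

def Spec_binary_and (a : Int) (b : Int) (out : String) : Prop := out = binary_and_alt a b
instance (a : Int) (b : Int) (out : String) : Decidable (Spec_binary_and a b out) := by unfold Spec_binary_and; infer_instance

-- ===== CLAIM (what is proved, stated in full; the proofs are below) =====
def Claim_equal_binary_and : Prop := ∀ (a : Int) (b : Int), Dom_binary_and a b → Pre_binary_and a b → Spec_binary_and a b (binary_and a b)

-- ===== LEMMAS AND PROOFS =====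

-- MSB-first list of the low m bits of n
def bitMap (n m : Nat) : List Char :=
  (List.range m).map (fun j => if n.testBit (m - 1 - j) then '1' else '0')

lemma zfill_digits (cs : List Char) (m : Nat) (hne : cs ≠ [])
    (hd : ∀ c ∈ cs, c.isDigit) (hlen : cs.length ≤ m) :
    PySem.Chars.zfill cs (m : Int) = List.replicate (m - cs.length) '0' ++ cs := by
  unfold PySem.Chars.zfill
  by_cases h : (m : Int) ≤ (cs.length : Int)
  · have : m = cs.length := by omega
    simp [this]
  · rw [if_neg h]
    cases cs with
    | nil => exact absurd rfl hne
    | cons c rest =>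
      have hc : c.isDigit := hd c (List.mem_cons_self ..)
      have hplus : ¬ (c = '+' ∨ c = '-') := by
        rintro (rfl | rfl) <;> simp [Char.isDigit] at hc
      simp only [if_neg hplus, Int.toNat_natCast]

lemma bitMap_succ (n m : Nat) :
    bitMap n (m + 1) = bitMap (n / 2) m ++ [if n.testBit 0 then '1' else '0'] := by
  unfold bitMap
  rw [List.range_succ, List.map_append]
  congr 1
  · apply List.map_congr_left
    intro j hj
    have hjm : j < m := List.mem_range.mp hj
    have h1 : m + 1 - 1 - j = (m - 1 - j) + 1 := by omega
    rw [h1, Nat.testBit_succ]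
  · simp

lemma replicate_toDigits (m : Nat) : ∀ (n : Nat), 0 < m → n < 2 ^ m →
    List.replicate (m - (Nat.toDigits 2 n).length) '0' ++ Nat.toDigits 2 n = bitMap n m := by
  induction m with
  | zero => intro n hm; omega
  | succ m ih =>
    intro n _ hn
    by_cases hm : m = 0
    · subst hm
      interval_cases n <;> decide
    · have hm' : 0 < m := Nat.pos_of_ne_zero hm
      rw [bitMap_succ n m]
      by_cases h2 : n < 2
      · have hdig : Nat.toDigits 2 n = [Nat.digitChar n] := Nat.toDigits_of_lt_base h2
        have hdiv : n / 2 = 0 := Nat.div_eq_of_lt h2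
        have hrep := ih 0 hm' (Nat.two_pow_pos m)
        rw [hdig]
        have hlast : Nat.digitChar n = (if n.testBit 0 then '1' else '0') := by
          interval_cases n <;> decide
        rw [hlast, hdiv, ← hrep, Nat.toDigits_zero]
        simp only [List.length_singleton]
        rw [show m + 1 - 1 = (m - 1) + 1 by omega, List.replicate_succ']
      · have hge : 2 ≤ n := by omega
        have hdig : Nat.toDigits 2 n = Nat.toDigits 2 (n / 2) ++ [Nat.digitChar (n % 2)] :=
          Nat.toDigits_of_base_le (by norm_num) hge
        have hdivlt : n / 2 < 2 ^ m :=
          Nat.div_lt_of_lt_mul (by rw [← pow_succ']; exact hn)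
        have hrep := ih (n / 2) hm' hdivlt
        have hlast : Nat.digitChar (n % 2) = (if n.testBit 0 then '1' else '0') := by
          rcases Nat.mod_two_eq_zero_or_one n with h | h <;>
            simp [Nat.testBit_zero, h] <;> decide
        rw [hdig, hlast, ← hrep, List.length_append, List.length_singleton]
        have : m + 1 - ((Nat.toDigits 2 (n / 2)).length + 1)
             = m - (Nat.toDigits 2 (n / 2)).length := by omega
        rw [this, ← List.append_assoc]

lemma zfill_bitMap (n m : Nat) (hm : 0 < m) (hn : n < 2 ^ m) :
    PySem.Chars.zfill (Nat.toDigits 2 n) (m : Int) = bitMap n m := by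
  rw [zfill_digits _ _ (by have := @Nat.length_toDigits_pos 2 n; intro h; simp [h] at this)
        (fun c hc => Nat.isDigit_of_mem_toDigits (by norm_num) (by norm_num) hc)
        ((Nat.length_toDigits_le_iff (by norm_num) hm).mpr hn)]
  exact replicate_toDigits m n hm hn

lemma zip_bitMap_and (a b m : Nat) :
    ((bitMap a m).zip (bitMap b m)).map (fun p => if p.1 = '1' ∧ p.2 = '1' then '1' else '0')
      = bitMap (a &&& b) m := by
  unfold bitMap
  rw [List.zip_map', List.map_map]
  apply List.map_congr_left
  intro j _
  simp only [Function.comp_apply, Nat.testBit_and]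
  cases ha : a.testBit (m - 1 - j) <;> cases hb : b.testBit (m - 1 - j) <;> simp

lemma length_toDigits_lt (n m : Nat) (h : (Nat.toDigits 2 n).length ≤ m) (hm : 0 < m) :
    n < 2 ^ m := (Nat.length_toDigits_le_iff (by norm_num) hm).mp h

-- ===== VERDICT (by name: the statement is the Claim_ definition above) =====
theorem binary_and_spec : Claim_equal_binary_and := by
  intro a b _ hpre
  obtain ⟨ha, hb⟩ := hpre
  unfold Spec_binary_and binary_and binary_and_alt
  rw [if_neg (by omega), if_neg (by omega)]
  have hanat : ¬ a < 0 := by omega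
  have hbnat : ¬ b < 0 := by omega
  -- names for the digit lists
  set na := a.toNat with hna
  set nb := b.toNat with hnb
  have hbinA : (PySem.Int.pyBin a).toList = '0' :: 'b' :: Nat.toDigits 2 na := by
    rw [PySem.Int.toList_pyBin]; unfold PySem.Int.toBinChars0b; rw [if_neg hanat]
  have hbinB : (PySem.Int.pyBin b).toList = '0' :: 'b' :: Nat.toDigits 2 nb := by
    rw [PySem.Int.toList_pyBin]; unfold PySem.Int.toBinChars0b; rw [if_neg hbnat]
  set dA := Nat.toDigits 2 na with hdA
  set dB := Nat.toDigits 2 nb with hdB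
  set m : Nat := max dA.length dB.length with hmdef
  have hmA : dA.length ≤ m := le_max_left _ _
  have hmB : dB.length ≤ m := le_max_right _ _
  have hm : 0 < m := lt_of_lt_of_le Nat.length_toDigits_pos hmA
  have hltA : na < 2 ^ m := length_toDigits_lt na m hmA hm
  have hltB : nb < 2 ^ m := length_toDigits_lt nb m hmB hm
  -- the sliced strings are the digit lists
  have hsliceA : (PySem.Str.slice (PySem.Int.pyBin a) (some 2) none).toList = dA := by
    unfold PySem.Str.slice PySem.Chars.slice
    rw [String.toList_ofList, hbinA,
        show (2 : Int) = ((2 : Nat) : Int) from rfl, PySem.List.slice_from_natCast]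
    rfl
  have hsliceB : (PySem.Str.slice (PySem.Int.pyBin b) (some 2) none).toList = dB := by
    unfold PySem.Str.slice PySem.Chars.slice
    rw [String.toList_ofList, hbinB,
        show (2 : Int) = ((2 : Nat) : Int) from rfl, PySem.List.slice_from_natCast]
    rfl
  -- both widths are (m : Int)
  have hlenA : PySem.Str.len (PySem.Str.slice (PySem.Int.pyBin a) (some 2) none) = (dA.length : Int) := by
    unfold PySem.Str.len; rw [hsliceA]
  have hlenB : PySem.Str.len (PySem.Str.slice (PySem.Int.pyBin b) (some 2) none) = (dB.length : Int) := by
    unfold PySem.Str.len; rw [hsliceB]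
  have hwidthA : max (PySem.Str.len (PySem.Str.slice (PySem.Int.pyBin a) (some 2) none))
      (PySem.Str.len (PySem.Str.slice (PySem.Int.pyBin b) (some 2) none)) = (m : Int) := by
    rw [hlenA, hlenB, hmdef]; push_cast; rfl
  have hwidthB : max (PySem.Str.len (PySem.Int.pyBin a) - 2) (PySem.Str.len (PySem.Int.pyBin b) - 2)
      = (m : Int) := by
    unfold PySem.Str.len
    rw [hbinA, hbinB]
    simp only [List.length_cons]
    rw [hmdef]; push_cast; omega
  -- A's joined bit list equals B's padded bit list
  have hband : PySem.Int.band a b = ((na &&& nb : Nat) : Int) := PySem.Int.band_of_nonneg ha hb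
  have hbinAB : PySem.Int.toBinChars (PySem.Int.band a b) = Nat.toDigits 2 (na &&& nb) := by
    unfold PySem.Int.toBinChars
    rw [hband, if_neg (Int.not_lt.mpr (Int.natCast_nonneg _))]
    simp
  have hltAB : (na &&& nb) < 2 ^ m := lt_of_le_of_lt Nat.and_le_left hltA
  dsimp only
  rw [hwidthA, hwidthB]
  unfold PySem.Str.zfill PySem.Int.toBin
  rw [String.toList_ofList, String.toList_ofList, hsliceA, hsliceB, hbinAB, String.toList_ofList,
      zfill_bitMap na m hm hltA, zfill_bitMap nb m hm hltB,
      zfill_bitMap (na &&& nb) m hm hltAB, zip_bitMap_and]
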